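-- pv_equiv track=rewrite | github.com/bedekelly/launcher | main.py | embolden
-- ===== SOURCE A (Python) =====
-- def embolden(item, pattern=""):
--     """Make certain letters in 'item' bold, based on the pattern that matches it."""
--     def bold(char):
--         return '[BOLD]' + char + '[/BOLD]'
--     if pattern == "":
--         return ' '.join(item)
--
--     first_char = item.lower().index(pattern.lower()[0])
--
--     first, char, second = item[:first_char], item[first_char], item[first_char+1:]
--     first_bit = ' '.join(first)
--     char = bold(char)
--     second_bit = embolden(second, pattern=pattern[1:])
--     return (first_bit + ' ' + char + ' ' + second_bit).strip()
-- ===== SOURCE B (Python) =====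
-- def embolden(item, pattern=""):
--     """Single forward pass: greedily mark pattern chars bold, then assemble the
--     output once, instead of slicing and re-joining recursively."""
--     if pattern == "":
--         return ' '.join(item)
--     low = pattern.lower()
--     segs = []    # finished plain-text segments, each followed by a bold char
--     bolds = []   # bolded characters, in order
--     cur = []     # current plain-text segment
--     pi = 0
--     for ch in item:
--         if pi < len(low) and ch.lower() == low[pi]:
--             bolds.append('[BOLD]' + ch + '[/BOLD]')
--             segs.append(cur)
--             cur = []
--             pi += 1
--         else:
--             cur.append(ch)
--     if pi < len(low):
--         raise ValueError("pattern is not a subsequence of item")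
--     parts = []
--     for s, b in zip(segs, bolds):
--         while s and s[0].isspace():     # drop leading whitespace of the segment
--             s = s[1:]
--         if s:
--             parts.append(' '.join(s))
--         parts.append(b)
--     tail = cur
--     while tail and tail[-1].isspace():  # drop trailing whitespace of the tail
--         tail = tail[:-1]
--     if tail:
--         parts.append(' '.join(tail))
--     return ' '.join(parts)
-- ===== Notes on version B (the rewrite author's own statement) =====
-- stated objective: faster
-- what changed: B replaces A's recursion with repeated slicing, re-joining and nested .strip() calls by one forward pass that greedily splits item into plain segments and bold characters, then assembles the output once (stripping only leading whitespace of inner segments and trailing whitespace of the tail, which is exactly what A's nested strips amount to).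
import Mathlib
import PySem

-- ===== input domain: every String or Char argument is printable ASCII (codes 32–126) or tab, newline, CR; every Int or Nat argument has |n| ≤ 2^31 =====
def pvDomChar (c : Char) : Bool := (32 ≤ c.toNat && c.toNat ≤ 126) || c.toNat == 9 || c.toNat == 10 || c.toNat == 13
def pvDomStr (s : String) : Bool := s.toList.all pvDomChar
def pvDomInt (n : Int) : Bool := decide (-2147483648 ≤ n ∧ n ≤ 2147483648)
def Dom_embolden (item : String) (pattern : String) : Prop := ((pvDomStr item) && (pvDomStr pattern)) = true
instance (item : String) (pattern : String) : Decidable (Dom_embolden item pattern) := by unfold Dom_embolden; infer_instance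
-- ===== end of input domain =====

-- B replaces A's recursive slice/re-join/nested-strip scheme by one forward pass that splits
-- item into plain segments and bold characters and assembles the output once (simpler).

-- ===== PORT A =====
-- bold(char) = '[BOLD]' + char + '[/BOLD]'  (shared helper of both Pythons)
def pvBold (c : Char) : List Char := "[BOLD]".toList ++ (c :: "[/BOLD]".toList)

-- ' '.join(s) over the characters of s
def pvJoin (s : List Char) : List Char := PySem.Chars.join [' '] (s.map (fun c => [c]))

def emboldenGo (item : List Char) (pattern : List Char) : List Char :=
  match pattern with
  | [] => pvJoin item
  | p :: rest =>
    -- item.lower().index(pattern.lower()[0]): first index of the lowered char; none = ValueError (excluded by Pre_)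
    match PySem.List.index? (PySem.Chars.lower item) (PySem.Chars.lowerChar p) with
    | none => []
    | some i =>
      let first := item.take i                          -- item[:first_char]
      let ch := PySem.List.pyGetD item (i : Int) ' '    -- item[first_char] (in range: i is an index)
      let second := item.drop (i + 1)                   -- item[first_char+1:]
      PySem.Chars.strip (pvJoin first ++ [' '] ++ pvBold ch ++ [' '] ++ emboldenGo second rest)

def embolden (item : String) (pattern : String) : String :=
  String.ofList (emboldenGo item.toList pattern.toList)

-- ===== PORT B =====
-- one step of B's forward scan; state = (segs, bolds, cur, remaining lowered pattern)
def pvStep (st : List (List Char) × List (List Char) × List Char × List Char) (ch : Char) :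
    List (List Char) × List (List Char) × List Char × List Char :=
  match st with
  | (segs, bolds, cur, []) => (segs, bolds, cur ++ [ch], [])
  | (segs, bolds, cur, q :: lrest) =>
    if PySem.Chars.lowerChar ch = q then (segs ++ [cur], bolds ++ [pvBold ch], [], lrest)
    else (segs, bolds, cur ++ [ch], q :: lrest)

-- the `for s, b in zip(segs, bolds)` assembly loop of B
def pvParts (segs bolds : List (List Char)) : List (List Char) :=
  List.foldl
    (fun (acc : List (List Char)) (sb : List Char × List Char) =>
      (if sb.1.dropWhile PySem.Chars.isspace = [] then acc
       else acc ++ [pvJoin (sb.1.dropWhile PySem.Chars.isspace)]) ++ [sb.2])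
    [] (segs.zip bolds)

def pvAssemble (segs bolds : List (List Char)) (cur : List Char) : List Char :=
  let tail := cur.rdropWhile PySem.Chars.isspace
  PySem.Chars.join [' '] (pvParts segs bolds ++ (if tail = [] then [] else [pvJoin tail]))

def emboldenAltGo (item : List Char) (pattern : List Char) : List Char :=
  if pattern = [] then pvJoin item
  else
    let st := item.foldl pvStep ([], [], [], PySem.Chars.lower pattern)
    -- Python B raises ValueError when the pattern is not fully consumed — excluded by Pre_
    if st.2.2.2 = [] then pvAssemble st.1 st.2.1 st.2.2.1 else []

def embolden_alt (item : String) (pattern : String) : String :=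
  String.ofList (emboldenAltGo item.toList pattern.toList)

-- ===== PRECONDITION & SPEC =====
-- A raises ValueError exactly when the lowered pattern is not a subsequence of the lowered item
-- (some `.index` call then fails); Python B raises ValueError on the same inputs.
def Pre_embolden (item : String) (pattern : String) : Prop :=
  (PySem.Chars.lower pattern.toList).Sublist (PySem.Chars.lower item.toList)
instance (item : String) (pattern : String) : Decidable (Pre_embolden item pattern) := by
  unfold Pre_embolden; infer_instance

def pvWitness_embolden : String × String := ("Hello world", "hw")

def Spec_embolden (item : String) (pattern : String) (out : String) : Prop := out = embolden_alt item pattern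
instance (item : String) (pattern : String) (out : String) : Decidable (Spec_embolden item pattern out) := by unfold Spec_embolden; infer_instance

-- ===== CLAIM (what is proved, stated in full; the proofs are below) =====
def Claim_equal_embolden : Prop := ∀ (item : String) (pattern : String), Dom_embolden item pattern → Pre_embolden item pattern → Spec_embolden item pattern (embolden item pattern)

-- ===== LEMMAS AND PROOFS =====

theorem pvCat_cons (P : List Char) (rest : List (List Char)) :
    PySem.Chars.join [' '] (P :: rest) = P ++ (if rest = [] then [] else ' ' :: PySem.Chars.join [' '] rest) := by
  cases rest with
  | nil => simp [PySem.Chars.join, List.intercalate]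
  | cons Q r => simp [PySem.Chars.join, List.intercalate, List.intersperse]

theorem pvJoin_nil : pvJoin [] = [] := by simp [pvJoin, PySem.Chars.join, List.intercalate]

theorem pvJoin_cons (c : Char) (s : List Char) :
    pvJoin (c :: s) = c :: (if s = [] then [] else ' ' :: pvJoin s) := by
  simp only [pvJoin, List.map, pvCat_cons]
  cases s <;> simp

theorem pvJoin_concat (s : List Char) (c : Char) :
    pvJoin (s ++ [c]) = (if s = [] then [] else pvJoin s ++ [' ']) ++ [c] := by
  induction s with
  | nil => simp [pvJoin_cons]
  | cons d s ih =>
    rw [List.cons_append, pvJoin_cons, pvJoin_cons, ih]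
    cases s <;> simp

theorem pvJoin_reverse (s : List Char) : (pvJoin s).reverse = pvJoin s.reverse := by
  induction s with
  | nil => simp [pvJoin_nil]
  | cons c s ih =>
    rw [pvJoin_cons, show (c :: s).reverse = s.reverse ++ [c] from by simp, pvJoin_concat s.reverse c]
    by_cases hs : s = []
    · simp [hs]
    · have h2 : s.reverse ≠ [] := by simpa using hs
      simp [hs, h2, ← ih]

theorem pvWs_space : PySem.Chars.isspace ' ' = true := by decide

theorem pvL1 (s r : List Char) (a : Char) (t : List Char) (hr : r = a :: t)
    (ha : PySem.Chars.isspace a = false) :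
    (pvJoin s ++ ' ' :: r).dropWhile PySem.Chars.isspace =
      if s.dropWhile PySem.Chars.isspace = [] then r
      else pvJoin (s.dropWhile PySem.Chars.isspace) ++ ' ' :: r := by
  induction s with
  | nil =>
    subst hr
    simp [pvJoin_nil, List.dropWhile, ha, pvWs_space]
  | cons c s ih =>
    rw [pvJoin_cons]
    by_cases hc : PySem.Chars.isspace c = true
    · cases hs : s with
      | nil =>
        subst hr hs
        simp [List.dropWhile, hc, ha, pvWs_space]
      | cons d u =>
        have hsne : s ≠ [] := by rw [hs]; simp
        rw [← hs, if_neg hsne]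
        rw [show (c :: ' ' :: pvJoin s) ++ ' ' :: r = c :: ' ' :: (pvJoin s ++ ' ' :: r) from by simp]
        rw [List.dropWhile_cons_of_pos hc, List.dropWhile_cons_of_pos pvWs_space, ih,
          show List.dropWhile PySem.Chars.isspace (c :: s) = List.dropWhile PySem.Chars.isspace s from
            List.dropWhile_cons_of_pos hc]
    · have hc' : PySem.Chars.isspace c = false := by simpa using hc
      have h1 : (c :: s).dropWhile PySem.Chars.isspace = c :: s := by
        simp [List.dropWhile, hc']
      cases hs : s with
      | nil => subst hs; subst hr; simp [List.dropWhile, hc', pvJoin_cons]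
      | cons d u =>
        have hsne : s ≠ [] := by rw [hs]; simp
        rw [← hs]
        rw [if_neg hsne, h1, if_neg (by simp : ¬ (c :: s = []))]
        simp [hc', pvJoin_cons, hsne]

theorem pvRstrip_eq (s : List Char) : PySem.Chars.rstrip s = s.rdropWhile PySem.Chars.isspace := by
  simp [PySem.Chars.rstrip, List.rdropWhile]

theorem pvRdrop_of_good (Y X : List Char)
    (hX : ∃ init b, X = init ++ [b] ∧ PySem.Chars.isspace b = false) :
    (Y ++ X).rdropWhile PySem.Chars.isspace = Y ++ X := by
  obtain ⟨init, b, rfl, hb⟩ := hX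
  rw [show Y ++ (init ++ [b]) = (Y ++ init) ++ [b] from by simp, List.rdropWhile_concat, if_neg (by simp [hb])]

theorem pvR1 (l t : List Char) (init : List Char) (b : Char) (hl : l = init ++ [b])
    (hb : PySem.Chars.isspace b = false) :
    (l ++ ' ' :: pvJoin t).rdropWhile PySem.Chars.isspace =
      if t.rdropWhile PySem.Chars.isspace = [] then l
      else l ++ ' ' :: pvJoin (t.rdropWhile PySem.Chars.isspace) := by
  have hrev : (l ++ ' ' :: pvJoin t).reverse = pvJoin t.reverse ++ ' ' :: l.reverse := by
    simp [pvJoin_reverse]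
  have hlr : l.reverse = b :: init.reverse := by simp [hl]
  rw [List.rdropWhile, hrev, pvL1 t.reverse l.reverse b init.reverse hlr hb]
  have hcond : (t.reverse.dropWhile PySem.Chars.isspace = []) ↔ (t.rdropWhile PySem.Chars.isspace = []) := by
    simp [List.rdropWhile]
  by_cases hc : t.reverse.dropWhile PySem.Chars.isspace = []
  · rw [if_pos hc, if_pos (hcond.mp hc)]; simp
  · rw [if_neg hc, if_neg (fun h => hc (hcond.mpr h))]
    rw [List.reverse_append, List.reverse_cons, List.reverse_reverse, pvJoin_reverse]
    simp [List.rdropWhile]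

theorem pvBold_head (c : Char) :
    pvBold c = '[' :: ('B'::'O'::'L'::'D'::']':: c :: '['::'/'::'B'::'O'::'L'::'D'::[']']) := by
  simp [pvBold]

theorem pvBold_last (c : Char) :
    pvBold c = ('['::'B'::'O'::'L'::'D'::']':: c :: '['::'/'::'B'::'O'::'L'::['D']) ++ [']'] := by
  simp [pvBold]

theorem pvWs_lb : PySem.Chars.isspace '[' = false := by decide

theorem pvWs_rb : PySem.Chars.isspace ']' = false := by decide

def pvGood (X : List Char) : Prop :=
  (∃ a t, X = a :: t ∧ PySem.Chars.isspace a = false) ∧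
  (∃ init b, X = init ++ [b] ∧ PySem.Chars.isspace b = false)

theorem pvStrip_step (f : List Char) (c : Char) (X : List Char) (hX : pvGood X) :
    PySem.Chars.strip (pvJoin f ++ [' '] ++ pvBold c ++ [' '] ++ X) =
      (if f.dropWhile PySem.Chars.isspace = [] then [] else pvJoin (f.dropWhile PySem.Chars.isspace) ++ [' ']) ++
        pvBold c ++ ' ' :: X := by
  have hassoc : pvJoin f ++ [' '] ++ pvBold c ++ [' '] ++ X = pvJoin f ++ ' ' :: (pvBold c ++ ' ' :: X) := by
    simp
  have hr : pvBold c ++ ' ' :: X = '[' :: ('B'::'O'::'L'::'D'::']':: c :: '['::'/'::'B'::'O'::'L'::'D'::[']'] ++ ' ' :: X) := by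
    rw [pvBold_head]; simp
  rw [PySem.Chars.strip, PySem.Chars.lstrip, hassoc,
    pvL1 f (pvBold c ++ ' ' :: X) '[' _ hr pvWs_lb, pvRstrip_eq]
  by_cases hdw : f.dropWhile PySem.Chars.isspace = []
  · rw [if_pos hdw, if_pos hdw,
      show pvBold c ++ ' ' :: X = (pvBold c ++ [' ']) ++ X from by simp,
      pvRdrop_of_good _ _ hX.2]
    simp
  · rw [if_neg hdw, if_neg hdw,
      show pvJoin (f.dropWhile PySem.Chars.isspace) ++ ' ' :: (pvBold c ++ ' ' :: X) =
        (pvJoin (f.dropWhile PySem.Chars.isspace) ++ ' ' :: pvBold c ++ [' ']) ++ X from by simp,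
      pvRdrop_of_good _ _ hX.2]
    simp

theorem pvStrip_base (f : List Char) (c : Char) (t : List Char) :
    PySem.Chars.strip (pvJoin f ++ [' '] ++ pvBold c ++ [' '] ++ pvJoin t) =
      pvAssemble [f] [pvBold c] t := by
  have hassoc : pvJoin f ++ [' '] ++ pvBold c ++ [' '] ++ pvJoin t
      = pvJoin f ++ ' ' :: (pvBold c ++ ' ' :: pvJoin t) := by simp
  have hr : pvBold c ++ ' ' :: pvJoin t
      = '[' :: ('B'::'O'::'L'::'D'::']':: c :: '['::'/'::'B'::'O'::'L'::'D'::[']'] ++ ' ' :: pvJoin t) := by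
    rw [pvBold_head]; simp
  have hli : pvJoin (f.dropWhile PySem.Chars.isspace) ++ ' ' :: pvBold c
      = (pvJoin (f.dropWhile PySem.Chars.isspace) ++ ' ' :: ('['::'B'::'O'::'L'::'D'::']':: c :: '['::'/'::'B'::'O'::'L'::['D'])) ++ [']'] := by
    rw [pvBold_last]; simp
  rw [PySem.Chars.strip, PySem.Chars.lstrip, hassoc,
    pvL1 f (pvBold c ++ ' ' :: pvJoin t) '[' _ hr pvWs_lb, pvRstrip_eq]
  unfold pvAssemble pvParts
  by_cases hdw : f.dropWhile PySem.Chars.isspace = [] <;>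
  by_cases ht : t.rdropWhile PySem.Chars.isspace = [] <;>
    simp only [hdw, ht, List.zip_cons_cons, List.zip_nil_right, List.foldl_cons,
      List.foldl_nil, List.nil_append, List.append_nil, ite_true, ite_false]
  · rw [pvR1 (pvBold c) t _ ']' (pvBold_last c) pvWs_rb, if_pos ht]; simp
  · rw [pvR1 (pvBold c) t _ ']' (pvBold_last c) pvWs_rb, if_neg ht]; simp [pvCat_cons]
  · rw [show pvJoin (f.dropWhile PySem.Chars.isspace) ++ ' ' :: (pvBold c ++ ' ' :: pvJoin t)
        = (pvJoin (f.dropWhile PySem.Chars.isspace) ++ ' ' :: pvBold c) ++ ' ' :: pvJoin t from by simp,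
      pvR1 _ t _ ']' hli pvWs_rb, if_pos ht]
    simp [pvCat_cons]
  · rw [show pvJoin (f.dropWhile PySem.Chars.isspace) ++ ' ' :: (pvBold c ++ ' ' :: pvJoin t)
        = (pvJoin (f.dropWhile PySem.Chars.isspace) ++ ' ' :: pvBold c) ++ ' ' :: pvJoin t from by simp,
      pvR1 _ t _ ']' hli pvWs_rb, if_neg ht]
    simp [pvCat_cons]

def pvPiece (sb : List Char × List Char) : List (List Char) :=
  (if sb.1.dropWhile PySem.Chars.isspace = [] then []
   else [pvJoin (sb.1.dropWhile PySem.Chars.isspace)]) ++ [sb.2]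

theorem pvParts_eq (segs bolds : List (List Char)) :
    pvParts segs bolds = (segs.zip bolds).flatMap pvPiece := by
  unfold pvParts pvPiece
  rw [show (fun (acc : List (List Char)) (sb : List Char × List Char) =>
      (if sb.1.dropWhile PySem.Chars.isspace = [] then acc
       else acc ++ [pvJoin (sb.1.dropWhile PySem.Chars.isspace)]) ++ [sb.2]) =
      (fun acc sb =>
        acc ++ ((if sb.1.dropWhile PySem.Chars.isspace = [] then []
                  else [pvJoin (sb.1.dropWhile PySem.Chars.isspace)]) ++ [sb.2])) from by
    funext acc sb
    by_cases h : sb.1.dropWhile PySem.Chars.isspace = [] <;> simp [h]]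
  rw [PySem.List.foldl_append_eq_flatMap]
  rfl

theorem pvParts_cons (s : List Char) (segs : List (List Char)) (b : List Char) (bolds : List (List Char)) :
    pvParts (s :: segs) (b :: bolds) =
      (if s.dropWhile PySem.Chars.isspace = [] then []
       else [pvJoin (s.dropWhile PySem.Chars.isspace)]) ++ b :: pvParts segs bolds := by
  rw [pvParts_eq, pvParts_eq, List.zip_cons_cons, List.flatMap_cons]
  by_cases h : s.dropWhile PySem.Chars.isspace = [] <;> simp [pvPiece, h]

theorem pvParts_ne_nil (segs bolds : List (List Char)) (h : segs.zip bolds ≠ []) :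
    pvParts segs bolds ≠ [] := by
  cases hz : segs.zip bolds with
  | nil => exact absurd hz h
  | cons sb zs =>
    cases segs with
    | nil => simp at hz
    | cons s segs' =>
      cases bolds with
      | nil => simp at hz
      | cons b bolds' =>
        rw [pvParts_cons]
        by_cases hd : s.dropWhile PySem.Chars.isspace = [] <;> simp [hd]

theorem pvAssemble_cons (f : List Char) (c : Char) (segs bolds : List (List Char)) (cur : List Char)
    (hne : segs.zip bolds ≠ []) :
    pvAssemble (f :: segs) (pvBold c :: bolds) cur =
      (if f.dropWhile PySem.Chars.isspace = [] then [] else pvJoin (f.dropWhile PySem.Chars.isspace) ++ [' ']) ++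
        pvBold c ++ ' ' :: pvAssemble segs bolds cur := by
  unfold pvAssemble
  dsimp only
  rw [pvParts_cons]
  set T := (if cur.rdropWhile PySem.Chars.isspace = [] then ([] : List (List Char))
    else [pvJoin (cur.rdropWhile PySem.Chars.isspace)]) with hT
  have hQ : pvParts segs bolds ++ T ≠ [] := by
    intro h
    exact pvParts_ne_nil segs bolds hne (List.append_eq_nil_iff.mp h).1
  by_cases hdw : f.dropWhile PySem.Chars.isspace = []
  · rw [if_pos hdw, if_pos hdw]
    rw [show ((([] : List (List Char)) ++ pvBold c :: pvParts segs bolds) ++ T)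
        = pvBold c :: (pvParts segs bolds ++ T) from by simp]
    rw [pvCat_cons, if_neg hQ]
    simp
  · rw [if_neg hdw, if_neg hdw]
    rw [show ((([pvJoin (f.dropWhile PySem.Chars.isspace)] : List (List Char)) ++ pvBold c :: pvParts segs bolds) ++ T)
        = pvJoin (f.dropWhile PySem.Chars.isspace) :: pvBold c :: (pvParts segs bolds ++ T) from by simp]
    rw [pvCat_cons, pvCat_cons, if_neg hQ]
    simp

theorem pvCat_good2 (init : List (List Char)) (P : List Char) (b : Char) :
    ∀ Q : List (List Char), Q = init ++ [P ++ [b]] →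
      ∃ i2, PySem.Chars.join [' '] Q = i2 ++ [b] := by
  induction init with
  | nil => intro Q hQ; subst hQ; exact ⟨P, by rw [List.nil_append, pvCat_cons]; simp⟩
  | cons R init' ih =>
    intro Q hQ
    subst hQ
    obtain ⟨i2, hi2⟩ := ih (init' ++ [P ++ [b]]) rfl
    refine ⟨R ++ ' ' :: i2, ?_⟩
    rw [List.cons_append, pvCat_cons, if_neg (by simp), hi2]
    simp

theorem pvAssemble_good (segs bolds : List (List Char)) (cur : List Char)
    (hzip : segs.zip bolds ≠ [])
    (hshape : ∀ b ∈ bolds, ∃ ch, b = pvBold ch) :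
    pvGood (pvAssemble segs bolds cur) := by
  constructor
  · -- starts with a non-space char
    cases segs with
    | nil => simp at hzip
    | cons s segs' =>
      cases bolds with
      | nil => simp at hzip
      | cons b bolds' =>
        obtain ⟨ch, rfl⟩ := hshape b (by simp)
        unfold pvAssemble
        dsimp only
        rw [pvParts_cons]
        set T := (if cur.rdropWhile PySem.Chars.isspace = [] then ([] : List (List Char))
          else [pvJoin (cur.rdropWhile PySem.Chars.isspace)]) with hT
        by_cases hdw : s.dropWhile PySem.Chars.isspace = []
        · rw [if_pos hdw]
          rw [show (([] : List (List Char)) ++ pvBold ch :: pvParts segs' bolds') ++ T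
              = pvBold ch :: (pvParts segs' bolds' ++ T) from by simp]
          rw [pvCat_cons, pvBold_head, List.cons_append]
          exact ⟨'[', _, rfl, pvWs_lb⟩
        · rw [if_neg hdw]
          obtain ⟨a, t, hat⟩ : ∃ a t, s.dropWhile PySem.Chars.isspace = a :: t := by
            cases h : s.dropWhile PySem.Chars.isspace with
            | nil => exact absurd h hdw
            | cons a t => exact ⟨a, t, rfl⟩
          have ha : PySem.Chars.isspace a = false := by
            have h2 := List.head_dropWhile_not PySem.Chars.isspace hdw
            simp only [hat, List.head_cons] at h2
            exact h2
          rw [show (([pvJoin (s.dropWhile PySem.Chars.isspace)] : List (List Char)) ++ pvBold ch :: pvParts segs' bolds') ++ T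
              = pvJoin (s.dropWhile PySem.Chars.isspace) :: (pvBold ch :: pvParts segs' bolds' ++ T) from by simp]
          rw [pvCat_cons, hat, pvJoin_cons, List.cons_append]
          exact ⟨a, _, rfl, ha⟩
  · -- ends with a non-space char
    unfold pvAssemble
    dsimp only
    by_cases hc : cur.rdropWhile PySem.Chars.isspace = []
    · rw [if_pos hc, List.append_nil]
      obtain ⟨zs, sb, hzs⟩ : ∃ zs sb, segs.zip bolds = zs ++ [sb] := by
        rcases List.eq_nil_or_concat (segs.zip bolds) with h | ⟨zs, sb, h⟩
        · exact absurd h hzip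
        · exact ⟨zs, sb, by rw [h, List.concat_eq_append]⟩
      obtain ⟨ch2, hch2⟩ := hshape sb.2 (List.of_mem_zip (by rw [hzs]; simp : sb ∈ segs.zip bolds)).2
      have hQdec : pvParts segs bolds =
          ((zs.flatMap pvPiece) ++ (if sb.1.dropWhile PySem.Chars.isspace = [] then []
              else [pvJoin (sb.1.dropWhile PySem.Chars.isspace)])) ++
            [('['::'B'::'O'::'L'::'D'::']':: ch2 :: '['::'/'::'B'::'O'::'L'::['D']) ++ [']']] := by
        rw [pvParts_eq, hzs, List.flatMap_append, ← pvBold_last, ← hch2]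
        simp [pvPiece]
      rw [hQdec]
      obtain ⟨i2, hi2⟩ := pvCat_good2 _ _ ']' _ rfl
      exact ⟨i2, ']', hi2, pvWs_rb⟩
    · rw [if_neg hc]
      obtain ⟨init2, bb, h2⟩ : ∃ init2 bb, cur.rdropWhile PySem.Chars.isspace = init2 ++ [bb] := by
        rcases List.eq_nil_or_concat (cur.rdropWhile PySem.Chars.isspace) with h | ⟨i2, b2, h⟩
        · exact absurd h hc
        · exact ⟨i2, b2, by rw [h, List.concat_eq_append]⟩
      have hbb : PySem.Chars.isspace bb = false := by
        have h3 := List.rdropWhile_last_not PySem.Chars.isspace cur hc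
        simp only [h2] at h3
        simpa using h3
      obtain ⟨i2, hi2⟩ := pvCat_good2 (pvParts segs bolds)
        (if init2 = [] then [] else pvJoin init2 ++ [' ']) bb
        (pvParts segs bolds ++ [pvJoin (cur.rdropWhile PySem.Chars.isspace)])
        (by rw [h2, pvJoin_concat])
      exact ⟨i2, bb, hi2, hbb⟩

theorem pvScan_shift (xs : List Char) (segs bolds : List (List Char)) (cur lp : List Char) :
    xs.foldl pvStep (segs, bolds, cur, lp) =
      ((segs ++ (xs.foldl pvStep ([], [], cur, lp)).1,
        bolds ++ (xs.foldl pvStep ([], [], cur, lp)).2.1,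
        (xs.foldl pvStep ([], [], cur, lp)).2.2.1,
        (xs.foldl pvStep ([], [], cur, lp)).2.2.2)) := by
  induction xs generalizing segs bolds cur lp with
  | nil => simp
  | cons ch xs ih =>
    rw [List.foldl_cons, List.foldl_cons]
    cases lp with
    | nil =>
      rw [show pvStep (segs, bolds, cur, []) ch = (segs, bolds, cur ++ [ch], []) from rfl,
        show pvStep ([], [], cur, ([] : List Char)) ch = ([], [], cur ++ [ch], []) from rfl, ih]
    | cons q lrest =>
      by_cases hq : PySem.Chars.lowerChar ch = q
      · rw [show pvStep (segs, bolds, cur, q :: lrest) ch = (segs ++ [cur], bolds ++ [pvBold ch], [], lrest) from by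
            simp [pvStep, hq],
          show pvStep ([], [], cur, q :: lrest) ch = ([cur], [pvBold ch], [], lrest) from by
            simp [pvStep, hq],
          ih (segs ++ [cur]) (bolds ++ [pvBold ch]) [] lrest,
          ih [cur] [pvBold ch] [] lrest]
        simp
      · rw [show pvStep (segs, bolds, cur, q :: lrest) ch = (segs, bolds, cur ++ [ch], q :: lrest) from by
            simp [pvStep, hq],
          show pvStep ([], [], cur, q :: lrest) ch = ([], [], cur ++ [ch], q :: lrest) from by
            simp [pvStep, hq],
          ih segs bolds (cur ++ [ch]) (q :: lrest), ih [] [] (cur ++ [ch]) (q :: lrest)]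

theorem pvScan_empty (xs : List Char) (segs bolds : List (List Char)) (cur : List Char) :
    xs.foldl pvStep (segs, bolds, cur, []) = (segs, bolds, cur ++ xs, []) := by
  induction xs generalizing cur with
  | nil => simp
  | cons ch xs ih =>
    rw [List.foldl_cons, show pvStep (segs, bolds, cur, []) ch = (segs, bolds, cur ++ [ch], []) from rfl, ih]
    simp

theorem pvScan_nomatch (xs : List Char) (segs bolds : List (List Char)) (cur : List Char)
    (q : Char) (l : List Char) (h : ∀ ch ∈ xs, PySem.Chars.lowerChar ch ≠ q) :
    xs.foldl pvStep (segs, bolds, cur, q :: l) = (segs, bolds, cur ++ xs, q :: l) := by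
  induction xs generalizing cur with
  | nil => simp
  | cons ch xs ih =>
    have hq : PySem.Chars.lowerChar ch ≠ q := h ch (by simp)
    rw [List.foldl_cons,
      show pvStep (segs, bolds, cur, q :: l) ch = (segs, bolds, cur ++ [ch], q :: l) from by
        simp [pvStep, hq],
      ih (cur ++ [ch]) (fun c hc => h c (by simp [hc]))]
    simp

theorem pvScan_leftover (xs : List Char) :
    ∀ (segs bolds : List (List Char)) (cur lp : List Char),
      lp.Sublist (PySem.Chars.lower xs) →
      (xs.foldl pvStep (segs, bolds, cur, lp)).2.2.2 = [] := by
  induction xs with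
  | nil => intro segs bolds cur lp h; simpa using List.sublist_nil.mp (by simpa [PySem.Chars.lower] using h)
  | cons ch xs ih =>
    intro segs bolds cur lp h
    cases lp with
    | nil => rw [List.foldl_cons, show pvStep (segs, bolds, cur, []) ch = (segs, bolds, cur ++ [ch], []) from rfl]
             exact ih _ _ _ _ (List.nil_sublist _)
    | cons q l =>
      by_cases hq : PySem.Chars.lowerChar ch = q
      · rw [List.foldl_cons, show pvStep (segs, bolds, cur, q :: l) ch = (segs ++ [cur], bolds ++ [pvBold ch], [], l) from by
          simp [pvStep, hq]]
        apply ih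
        have h' : (q :: l).Sublist (PySem.Chars.lowerChar ch :: PySem.Chars.lower xs) := by
          simpa [PySem.Chars.lower] using h
        rcases h' with _ | _
        · exact List.sublist_of_cons_sublist (by assumption)
        · assumption
      · rw [List.foldl_cons, show pvStep (segs, bolds, cur, q :: l) ch = (segs, bolds, cur ++ [ch], q :: l) from by
          simp [pvStep, hq]]
        apply ih
        have h' : (q :: l).Sublist (PySem.Chars.lowerChar ch :: PySem.Chars.lower xs) := by
          simpa [PySem.Chars.lower] using h
        rcases h' with _ | h2
        · assumption
        · exact absurd rfl hq

theorem pvScan_lengths (xs : List Char) :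
    ∀ (segs bolds : List (List Char)) (cur lp : List Char),
      (xs.foldl pvStep (segs, bolds, cur, lp)).1.length + bolds.length =
        (xs.foldl pvStep (segs, bolds, cur, lp)).2.1.length + segs.length ∧
      (xs.foldl pvStep (segs, bolds, cur, lp)).2.1.length + (xs.foldl pvStep (segs, bolds, cur, lp)).2.2.2.length =
        bolds.length + lp.length := by
  induction xs with
  | nil => intro segs bolds cur lp; simp; omega
  | cons ch xs ih =>
    intro segs bolds cur lp
    cases lp with
    | nil =>
      rw [List.foldl_cons, show pvStep (segs, bolds, cur, []) ch = (segs, bolds, cur ++ [ch], []) from rfl]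
      exact ih segs bolds (cur ++ [ch]) []
    | cons q l =>
      by_cases hq : PySem.Chars.lowerChar ch = q
      · rw [List.foldl_cons, show pvStep (segs, bolds, cur, q :: l) ch = (segs ++ [cur], bolds ++ [pvBold ch], [], l) from by
          simp [pvStep, hq]]
        obtain ⟨h1, h2⟩ := ih (segs ++ [cur]) (bolds ++ [pvBold ch]) [] l
        constructor <;> simp at h1 h2 ⊢ <;> omega
      · rw [List.foldl_cons, show pvStep (segs, bolds, cur, q :: l) ch = (segs, bolds, cur ++ [ch], q :: l) from by
          simp [pvStep, hq]]
        exact ih segs bolds (cur ++ [ch]) (q :: l)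

theorem pvScan_shape (xs : List Char) :
    ∀ (segs bolds : List (List Char)) (cur lp : List Char),
      (∀ b ∈ bolds, ∃ ch, b = pvBold ch) →
      ∀ b ∈ (xs.foldl pvStep (segs, bolds, cur, lp)).2.1, ∃ ch, b = pvBold ch := by
  induction xs with
  | nil => intro segs bolds cur lp h; simpa using h
  | cons ch xs ih =>
    intro segs bolds cur lp h
    cases lp with
    | nil =>
      rw [List.foldl_cons, show pvStep (segs, bolds, cur, []) ch = (segs, bolds, cur ++ [ch], []) from rfl]
      exact ih segs bolds (cur ++ [ch]) [] h
    | cons q l =>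
      by_cases hq : PySem.Chars.lowerChar ch = q
      · rw [List.foldl_cons, show pvStep (segs, bolds, cur, q :: l) ch = (segs ++ [cur], bolds ++ [pvBold ch], [], l) from by
          simp [pvStep, hq]]
        refine ih _ _ _ _ ?_
        intro b hb
        rcases List.mem_append.mp hb with hb | hb
        · exact h b hb
        · exact ⟨ch, by simpa using hb⟩
      · rw [List.foldl_cons, show pvStep (segs, bolds, cur, q :: l) ch = (segs, bolds, cur ++ [ch], q :: l) from by
          simp [pvStep, hq]]
        exact ih segs bolds (cur ++ [ch]) (q :: l) h

theorem pvSublist_cons (a : Char) (l : List Char) (suf : List Char) :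
    ∀ pre : List Char, a ∉ pre → (a :: l).Sublist (pre ++ a :: suf) → l.Sublist suf := by
  intro pre
  induction pre with
  | nil =>
    intro _ h
    simp only [List.nil_append] at h
    rcases h with _ | h2
    · exact List.sublist_of_cons_sublist (by assumption)
    · assumption
  | cons x pre' ih =>
    intro hn h
    have hax : a ≠ x := fun he => hn (by simp [he])
    rw [List.cons_append] at h
    rcases h with _ | h2
    · exact ih (fun hm => hn (by simp [hm])) (by assumption)
    · exact absurd rfl hax

theorem pvMain (pattern : List Char) : ∀ item : List Char,
    (PySem.Chars.lower pattern).Sublist (PySem.Chars.lower item) →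
    emboldenGo item pattern = emboldenAltGo item pattern := by
  induction pattern with
  | nil => intro item _; simp [emboldenGo, emboldenAltGo]
  | cons p rest ih =>
    intro item h
    have hlow : PySem.Chars.lower (p :: rest) = PySem.Chars.lowerChar p :: PySem.Chars.lower rest := by
      simp [PySem.Chars.lower]
    rw [hlow] at h
    set q := PySem.Chars.lowerChar p with hq
    have hmem : q ∈ PySem.Chars.lower item := h.subset (by simp)
    obtain ⟨i, hidx⟩ := Option.isSome_iff_exists.mp ((PySem.List.index?_isSome_iff _ _).mpr hmem)
    obtain ⟨pre, suf, hdec, hlen, hnot⟩ := (PySem.List.index?_eq_some_iff _ _ _).mp hidx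
    have hdec' : item.map PySem.Chars.lowerChar = pre ++ q :: suf := by
      simpa [PySem.Chars.lower] using hdec
    obtain ⟨f, rest2, hitem, hf, hrest2⟩ := List.map_eq_append_iff.mp hdec'
    obtain ⟨c, sec, hrest2', hc, hsec⟩ := List.map_eq_cons_iff.mp hrest2
    subst hrest2'
    have hflen : f.length = i := by rw [← hlen, ← hf]; simp
    -- A side
    have htake : item.take i = f := by rw [hitem, ← hflen, List.take_left]
    have hget : PySem.List.pyGetD item (i : Int) ' ' = c := by
      rw [PySem.List.pyGetD_natCast, hitem, ← hflen]
      simp [List.getD]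
    have hdrop : item.drop (i + 1) = sec := by
      rw [hitem, ← hflen, show f ++ c :: sec = (f ++ [c]) ++ sec from by simp,
        show f.length + 1 = (f ++ [c]).length from by simp, List.drop_left]
    have hA : emboldenGo item (p :: rest) =
        PySem.Chars.strip (pvJoin f ++ [' '] ++ pvBold c ++ [' '] ++ emboldenGo sec rest) := by
      simp only [emboldenGo, ← hq, hidx]
      rw [htake, hget, hdrop]
    -- B side scan
    have hfnot : ∀ ch ∈ f, PySem.Chars.lowerChar ch ≠ q := by
      intro ch hch he
      exact hnot (by rw [← hf, ← he]; exact List.mem_map_of_mem hch)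
    have hsuf : (PySem.Chars.lower rest).Sublist (PySem.Chars.lower sec) := by
      rw [show PySem.Chars.lower sec = suf from by simpa [PySem.Chars.lower] using hsec]
      exact pvSublist_cons q (PySem.Chars.lower rest) suf pre hnot (hdec ▸ h)
    have hscan : item.foldl pvStep ([], [], [], q :: PySem.Chars.lower rest) =
        ([f] ++ (sec.foldl pvStep ([], [], [], PySem.Chars.lower rest)).1,
         [pvBold c] ++ (sec.foldl pvStep ([], [], [], PySem.Chars.lower rest)).2.1,
         (sec.foldl pvStep ([], [], [], PySem.Chars.lower rest)).2.2.1,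
         (sec.foldl pvStep ([], [], [], PySem.Chars.lower rest)).2.2.2) := by
      rw [hitem, show f ++ c :: sec = (f ++ [c]) ++ sec from by simp, List.foldl_append,
        List.foldl_append, pvScan_nomatch f [] [] [] q (PySem.Chars.lower rest) hfnot]
      rw [show List.foldl pvStep ([], [], [] ++ f, q :: PySem.Chars.lower rest) [c]
          = ([[] ++ f], [pvBold c], [], PySem.Chars.lower rest) from by
        simp [pvStep, ← hc]]
      rw [pvScan_shift sec [[] ++ f] [pvBold c] [] (PySem.Chars.lower rest)]
      simp
    set r := sec.foldl pvStep ([], [], [], PySem.Chars.lower rest) with hr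
    have hleft : r.2.2.2 = [] := pvScan_leftover sec [] [] [] (PySem.Chars.lower rest) hsuf
    have hB : emboldenAltGo item (p :: rest) = pvAssemble (f :: r.1) (pvBold c :: r.2.1) r.2.2.1 := by
      rw [emboldenAltGo, if_neg (by simp), hlow]
      dsimp only
      rw [hscan]
      simp [hleft]
    rw [hA, hB]
    cases hrest : rest with
    | nil =>
      have hrnil : r = ([], [], sec, []) := by
        rw [hr, hrest]; simpa [PySem.Chars.lower] using pvScan_empty sec [] [] []
      rw [hrnil]
      simp only [emboldenGo]
      exact pvStrip_base f c sec
    | cons p2 rest2 =>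
      rw [← hrest]
      have hrne : rest ≠ [] := by rw [hrest]; simp
      obtain ⟨hl1, hl2⟩ := pvScan_lengths sec [] [] [] (PySem.Chars.lower rest)
      rw [← hr] at hl1 hl2
      have hlenb : r.2.1.length = (PySem.Chars.lower rest).length := by
        rw [hleft] at hl2; simpa using hl2
      have hlowne : (PySem.Chars.lower rest).length ≠ 0 := by
        simp [PySem.Chars.lower, hrest]
      have hzip : r.1.zip r.2.1 ≠ [] := by
        intro hz
        rcases List.zip_eq_nil_iff.mp hz with h0 | h0
        · rw [h0] at hl1; simp at hl1; exact hlowne (by omega)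
        · rw [h0] at hlenb; simp at hlenb; exact hlowne (by omega)
      have hshape : ∀ b ∈ r.2.1, ∃ ch, b = pvBold ch :=
        hr ▸ pvScan_shape sec [] [] [] (PySem.Chars.lower rest) (by simp)
      have hXgood : pvGood (pvAssemble r.1 r.2.1 r.2.2.1) := pvAssemble_good _ _ _ hzip hshape
      have hBX : emboldenAltGo sec rest = pvAssemble r.1 r.2.1 r.2.2.1 := by
        rw [emboldenAltGo, if_neg hrne]
        dsimp only
        rw [← hr]
        simp [hleft]
      rw [ih sec hsuf, hBX, pvStrip_step f c _ hXgood,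
        pvAssemble_cons f c r.1 r.2.1 r.2.2.1 hzip]

-- ===== VERDICT (by name: the statement is the Claim_ definition above) =====
theorem embolden_spec : Claim_equal_embolden := by
  intro item pattern _ hpre
  unfold Spec_embolden embolden embolden_alt
  exact congrArg String.ofList (pvMain pattern.toList item.toList hpre)
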